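-- pv_equiv track=rewrite | github.com/lukestpierre/lexicalpredictor | functions.py | letter_digit
-- ===== SOURCE A (Python) =====
-- def letter_digit(url_string):
--     ldl_count = 0
--     dld_count = 0
--     length_url_string = len(url_string)
--     number_of_checks = length_url_string-2
--     numeric_list = ['0','1','2','3','4','5','6','7','8','9']
--     alphabet_list = ['a','b','c','d','e','f','g','h','i','j','k','l','m','n','o','p','q','r','s','t','u','v','w','x','y','z','A','B','C','D','E','F','G','H','I','J','K','L','M','N','O','P','Q','R','S','T','U','V','W','X','Y','Z']
--     for character in range(number_of_checks):
--         temp_string = url_string[character:character+3]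
--         if temp_string[0] in numeric_list and temp_string[1] in alphabet_list and temp_string[2] in numeric_list:
--             dld_count+=1
--         elif temp_string[0] in alphabet_list and temp_string[1] in numeric_list and temp_string[2] in alphabet_list:
--             ldl_count+=1
--         else:
--             None
--     return ldl_count, dld_count
-- ===== SOURCE B (Python) =====
-- def letter_digit(url_string):
--     DIGIT, LETTER, OTHER = 0, 1, 2
--
--     def cls(ch):
--         if '0' <= ch <= '9':
--             return DIGIT
--         if 'a' <= ch <= 'z' or 'A' <= ch <= 'Z':
--             return LETTER
--         return OTHER
--
--     ldl_count = 0
--     dld_count = 0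
--     n = len(url_string)
--     i = 0
--     while i < n:
--         c0 = cls(url_string[i])
--         if c0 == OTHER:
--             i += 1
--             continue
--         # extend the maximal alternating digit/letter run starting at i
--         j = i + 1
--         prev = c0
--         while j < n:
--             cj = cls(url_string[j])
--             if cj == OTHER or cj == prev:
--                 break
--             prev = cj
--             j += 1
--         m = (j - i) - 2  # number of 3-windows lying inside this run
--         if m > 0:
--             if c0 == DIGIT:
--                 dld_count += (m + 1) // 2
--                 ldl_count += m // 2
--             else:
--                 ldl_count += (m + 1) // 2
--                 dld_count += m // 2
--         i = j
--     return ldl_count, dld_count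
-- ===== Notes on version B (the rewrite author's own statement) =====
-- stated objective: alternative
-- what changed: Replaces A's per-window scan (slice each 3-character window and test membership in digit/letter lists) with a run-decomposition algorithm: an outer loop walks the string once, an inner loop extends each maximal alternating digit/letter run, and each run of length L contributes its ceil((L-2)/2)/floor((L-2)/2) windows by closed-form arithmetic instead of testing every window.
import Mathlib
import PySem

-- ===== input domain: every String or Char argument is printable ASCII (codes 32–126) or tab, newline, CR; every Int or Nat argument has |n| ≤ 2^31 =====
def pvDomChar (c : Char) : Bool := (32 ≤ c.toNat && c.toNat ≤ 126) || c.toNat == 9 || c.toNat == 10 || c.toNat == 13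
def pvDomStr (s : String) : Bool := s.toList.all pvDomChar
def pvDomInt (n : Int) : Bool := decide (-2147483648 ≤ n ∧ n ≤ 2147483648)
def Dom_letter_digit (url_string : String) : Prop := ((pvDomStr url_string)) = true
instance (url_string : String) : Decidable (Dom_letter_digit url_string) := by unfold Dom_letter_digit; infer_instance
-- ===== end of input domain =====

-- B replaces A's per-window scan with a run-decomposition algorithm: it walks the string once,
-- extends each maximal alternating digit/letter run, and adds each run's window counts in
-- closed form (objective: alternative; same asymptotic cost).

-- ===== PORT A =====
def ld_numeric : List Char := ['0','1','2','3','4','5','6','7','8','9']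
def ld_alphabet : List Char := ['a','b','c','d','e','f','g','h','i','j','k','l','m','n','o','p','q','r','s','t','u','v','w','x','y','z','A','B','C','D','E','F','G','H','I','J','K','L','M','N','O','P','Q','R','S','T','U','V','W','X','Y','Z']

-- loop body of A; temp_string always has length 3 when the loop runs, so pyGetD's default is unreachable
def ld_body (s : List Char) (st : Int × Int) (character : Int) : Int × Int :=
  let temp_string := PySem.List.slice s (some character) (some (character + 3))
  if ld_numeric.contains (PySem.List.pyGetD temp_string 0 ' ') && ld_alphabet.contains (PySem.List.pyGetD temp_string 1 ' ') && ld_numeric.contains (PySem.List.pyGetD temp_string 2 ' ')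
  then (st.1, st.2 + 1)
  else if ld_alphabet.contains (PySem.List.pyGetD temp_string 0 ' ') && ld_numeric.contains (PySem.List.pyGetD temp_string 1 ' ') && ld_alphabet.contains (PySem.List.pyGetD temp_string 2 ' ')
  then (st.1 + 1, st.2)
  else st

def letter_digit (url_string : String) : Int × Int :=
  let s := url_string.toList
  let length_url_string : Int := s.length
  let number_of_checks : Int := length_url_string - 2
  (PySem.List.pyRange 0 number_of_checks 1).foldl (ld_body s) (0, 0)

-- ===== PORT B =====
-- B's character classes DIGIT/LETTER/OTHER
inductive LdCls where
  | d | l | o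
deriving DecidableEq

def ldCls (c : Char) : LdCls :=
  if '0' ≤ c && c ≤ '9' then LdCls.d
  else if ('a' ≤ c && c ≤ 'z') || ('A' ≤ c && c ≤ 'Z') then LdCls.l
  else LdCls.o

-- inner while loop of B: number of characters extending the alternating run, and the remaining suffix
def ldTakeRun (prev : LdCls) : List Char → Nat × List Char
  | [] => (0, [])
  | x :: t =>
    if ldCls x = LdCls.o ∨ ldCls x = prev then (0, x :: t)
    else
      let p := ldTakeRun (ldCls x) t
      (p.1 + 1, p.2)

lemma ldTakeRun_len (prev : LdCls) (t : List Char) : (ldTakeRun prev t).2.length ≤ t.length := by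
  induction t generalizing prev with
  | nil => simp [ldTakeRun]
  | cons x t ih =>
    simp only [ldTakeRun]
    split
    · simp
    · exact le_trans (ih (ldCls x)) (by simp)

-- run-contribution step of B's outer loop (the `if m > 0` block)
def ldAdd (acc : Int × Int) (c : LdCls) (k : Nat) : Int × Int :=
  let m : Int := ((k : Int) + 1) - 2
  if 0 < m then
    if c = LdCls.d then (acc.1 + PySem.Int.floordiv m 2, acc.2 + PySem.Int.floordiv (m + 1) 2)
    else (acc.1 + PySem.Int.floordiv (m + 1) 2, acc.2 + PySem.Int.floordiv m 2)
  else acc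

-- outer while loop of B, accumulating (ldl_count, dld_count)
def ldGo : Int × Int → List Char → Int × Int
  | acc, [] => acc
  | acc, x :: t =>
    if ldCls x = LdCls.o then ldGo acc t
    else ldGo (ldAdd acc (ldCls x) (ldTakeRun (ldCls x) t).1) (ldTakeRun (ldCls x) t).2
termination_by _ l => l.length
decreasing_by
  all_goals (have := ldTakeRun_len (ldCls x) t; simp only [List.length_cons]; omega)

def letter_digit_alt (url_string : String) : Int × Int :=
  ldGo (0, 0) url_string.toList

-- ===== PRECONDITION & SPEC =====
def Spec_letter_digit (url_string : String) (out : Int × Int) : Prop := out = letter_digit_alt url_string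
instance (url_string : String) (out : Int × Int) : Decidable (Spec_letter_digit url_string out) := by unfold Spec_letter_digit; infer_instance

-- ===== CLAIM (what is proved, stated in full; the proofs are below) =====
def Claim_equal_letter_digit : Prop := ∀ (url_string : String), Dom_letter_digit url_string → Spec_letter_digit url_string (letter_digit url_string)

-- ===== LEMMAS AND PROOFS =====

def ld_is_d (c : Char) : Bool := '0' ≤ c && c ≤ '9'
def ld_is_l (c : Char) : Bool := ('a' ≤ c && c ≤ 'z') || ('A' ≤ c && c ≤ 'Z')

-- the overlapping 3-windows of a list, and the two window counts
def ldTrip (s : List Char) : List (Char × Char × Char) := s.zip ((s.drop 1).zip (s.drop 2))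
def Wldl (s : List Char) : Nat := (ldTrip s).countP (fun t => ld_is_l t.1 && ld_is_d t.2.1 && ld_is_l t.2.2)
def Wdld (s : List Char) : Nat := (ldTrip s).countP (fun t => ld_is_d t.1 && ld_is_l t.2.1 && ld_is_d t.2.2)

-- per-run window counts in Nat form (a run of k+1 characters has k - 1 windows)
def lcontribN (c : LdCls) (k : Nat) : Nat := if c = LdCls.d then (k - 1) / 2 else (k - 1 + 1) / 2
def dcontribN (c : LdCls) (k : Nat) : Nat := if c = LdCls.d then (k - 1 + 1) / 2 else (k - 1) / 2

lemma lcontribN_le1 (c : LdCls) (k : Nat) (h : k ≤ 1) : lcontribN c k = 0 := by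
  unfold lcontribN; split_ifs <;> omega

lemma dcontribN_le1 (c : LdCls) (k : Nat) (h : k ≤ 1) : dcontribN c k = 0 := by
  unfold dcontribN; split_ifs <;> omega

lemma ld_mem_numeric (c : Char) : c ∈ ld_numeric ↔ ld_is_d c = true := by
  simp [ld_numeric, ld_is_d, Char.le_def, Char.ext_iff, UInt32.le_iff_toNat_le, UInt32.ext_iff]
  omega

lemma ld_mem_alpha (c : Char) : c ∈ ld_alphabet ↔ ld_is_l c = true := by
  simp [ld_alphabet, ld_is_l, Char.le_def, Char.ext_iff, UInt32.le_iff_toNat_le, UInt32.ext_iff]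
  omega

lemma ld_is_d_iff (c : Char) : ld_is_d c = true ↔ ldCls c = LdCls.d := by
  unfold ld_is_d ldCls
  split_ifs <;> simp_all

lemma ld_is_l_iff (c : Char) : ld_is_l c = true ↔ ldCls c = LdCls.l := by
  unfold ld_is_l ldCls
  split_ifs with h1 h2 <;> simp_all
  revert h1
  simp [Char.le_def, UInt32.le_iff_toNat_le]
  omega

lemma ld_is_d_false (c : Char) (h : ldCls c ≠ LdCls.d) : ld_is_d c = false := by
  rw [Bool.eq_false_iff]; intro hc; exact h ((ld_is_d_iff c).1 hc)

lemma ld_is_l_false (c : Char) (h : ldCls c ≠ LdCls.l) : ld_is_l c = false := by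
  rw [Bool.eq_false_iff]; intro hc; exact h ((ld_is_l_iff c).1 hc)

lemma ldcls_dl (c : LdCls) (h : c ≠ LdCls.o) : c = LdCls.d ∨ c = LdCls.l := by
  cases c <;> simp_all

lemma ldcls_third (ca cx cy : LdCls) (h1 : ca ≠ LdCls.o) (h2 : cx ≠ LdCls.o) (h3 : cy ≠ LdCls.o)
    (h4 : cx ≠ ca) (h5 : cy ≠ cx) : cy = ca := by
  cases ca <;> cases cx <;> cases cy <;> simp_all

-- splitting off the first 3-window
lemma Wldl_cons (a x y : Char) (t : List Char) :
    Wldl (a :: x :: y :: t) = (if ld_is_l a && ld_is_d x && ld_is_l y then 1 else 0) + Wldl (x :: y :: t) := by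
  simp only [Wldl, ldTrip, List.drop, List.zip_cons_cons, List.countP_cons]
  split_ifs <;> omega

lemma Wdld_cons (a x y : Char) (t : List Char) :
    Wdld (a :: x :: y :: t) = (if ld_is_d a && ld_is_l x && ld_is_d y then 1 else 0) + Wdld (x :: y :: t) := by
  simp only [Wdld, ldTrip, List.drop, List.zip_cons_cons, List.countP_cons]
  split_ifs <;> omega

lemma ld_body_shift (a : Char) (s : List Char) (st : Int × Int) (k : Nat) :
    ld_body (a :: s) st ((k : Int) + 1) = ld_body s st (k : Int) := by
  have h : ((k : Int) + 1) = ((k + 1 : Nat) : Int) := by push_cast; ring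
  simp only [ld_body, h]
  have h3 : ((k + 1 : Nat) : Int) + 3 = ((k + 1 : Nat) : Int) + ((3 : Nat) : Int) := by norm_num
  have h3' : ((k : Nat) : Int) + 3 = ((k : Nat) : Int) + ((3 : Nat) : Int) := by norm_num
  rw [h3, h3', PySem.List.slice_natCast_add, PySem.List.slice_natCast_add, List.drop_succ_cons]

lemma ld_d_l_excl (c : Char) : ¬(ld_is_d c = true ∧ ld_is_l c = true) := by
  simp [ld_is_d, ld_is_l, Char.le_def, UInt32.le_iff_toNat_le]
  omega

-- A's loop computes the two window counts
lemma ld_key (s : List Char) (st : Int × Int) :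
    (List.range (s.length - 2)).foldl (fun st (k : Nat) => ld_body s st (k : Int)) st
      = (st.1 + (Wldl s : Int), st.2 + (Wdld s : Int)) := by
  induction s generalizing st with
  | nil => simp [Wldl, Wdld, ldTrip]
  | cons a s ih =>
    match s with
    | [] => simp [Wldl, Wdld, ldTrip]
    | [b] => simp [Wldl, Wdld, ldTrip]
    | b :: c :: t =>
      have hlen : (a :: b :: c :: t).length - 2 = t.length + 1 := by simp
      rw [hlen, List.range_succ_eq_map, List.foldl_cons, List.foldl_map]
      simp only [Nat.cast_zero]
      have hb0 : ld_body (a :: b :: c :: t) st 0 =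
          (if ld_is_d a && ld_is_l b && ld_is_d c then (st.1, st.2 + 1)
           else if ld_is_l a && ld_is_d b && ld_is_l c then (st.1 + 1, st.2) else st) := by
        have h03 : (0 : Int) + 3 = ((0 : Nat) : Int) + ((3 : Nat) : Int) := by norm_num
        simp only [ld_body]
        rw [show (some (0:Int)) = some ((0:Nat):Int) from rfl, h03, PySem.List.slice_natCast_add]
        simp [ld_mem_numeric, ld_mem_alpha, PySem.List.pyGetD]
      have hshift : ∀ (st' : Int × Int),
          (List.range t.length).foldl (fun st (k : Nat) => ld_body (a :: b :: c :: t) st ((Nat.succ k : Nat) : Int)) st'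
            = (List.range ((b :: c :: t).length - 2)).foldl (fun st (k : Nat) => ld_body (b :: c :: t) st (k : Int)) st' := by
        intro st'
        have : (b :: c :: t).length - 2 = t.length := by simp
        rw [this]
        apply PySem.List.foldl_congr_mem
        intro x k _
        have : ((Nat.succ k : Nat) : Int) = (k : Int) + 1 := by push_cast; ring
        rw [this, ld_body_shift]
      rw [hb0, hshift, ih, Wldl_cons, Wdld_cons]
      by_cases h1 : (ld_is_d a && ld_is_l b && ld_is_d c) = true
      · have h2 : ¬(ld_is_l a && ld_is_d b && ld_is_l c) = true := by
          intro h2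
          rw [Bool.and_eq_true, Bool.and_eq_true] at h1 h2
          exact ld_d_l_excl a ⟨h1.1.1, h2.1.1⟩
        simp [h1, h2, Prod.ext_iff]
        omega
      · by_cases h2 : (ld_is_l a && ld_is_d b && ld_is_l c) = true
        · simp [h1, h2, Prod.ext_iff]
          omega
        · simp [h1, h2]

-- B's inner loop: counting over the run it consumes
lemma ld_run (t : List Char) : ∀ a : Char, ldCls a ≠ LdCls.o →
    Wldl (a :: t) = lcontribN (ldCls a) (ldTakeRun (ldCls a) t).1 + Wldl ((ldTakeRun (ldCls a) t).2)
    ∧ Wdld (a :: t) = dcontribN (ldCls a) (ldTakeRun (ldCls a) t).1 + Wdld ((ldTakeRun (ldCls a) t).2) := by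
  induction t with
  | nil =>
    intro a _
    refine ⟨?_, ?_⟩ <;>
      simp [ldTakeRun, Wldl, Wdld, ldTrip, lcontribN_le1 _ 0 (by omega), dcontribN_le1 _ 0 (by omega)]
  | cons x t ih =>
    intro a ha
    by_cases hbr : ldCls x = LdCls.o ∨ ldCls x = ldCls a
    · -- the run stops before x: no window through both a and x can match
      have htr : ldTakeRun (ldCls a) (x :: t) = (0, x :: t) := by
        simp [ldTakeRun, hbr]
      rw [htr]
      have hkill : (∀ y : Char, (ld_is_l a && ld_is_d x && ld_is_l y) = false)
          ∧ (∀ y : Char, (ld_is_d a && ld_is_l x && ld_is_d y) = false) := by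
        rcases hbr with h | h
        · have hd := ld_is_d_false x (by simp [h])
          have hl := ld_is_l_false x (by simp [h])
          exact ⟨fun y => by simp [hd], fun y => by simp [hl]⟩
        · rcases ldcls_dl (ldCls a) ha with hda | hla
          · have h1 := ld_is_l_false a (by simp [hda])
            have h2 := ld_is_l_false x (by simp [h, hda])
            exact ⟨fun y => by simp [h1], fun y => by simp [h2]⟩
          · have h1 := ld_is_d_false x (by simp [h, hla])
            have h2 := ld_is_d_false a (by simp [hla])
            exact ⟨fun y => by simp [h1], fun y => by simp [h2]⟩
      have hfail : Wldl (a :: x :: t) = Wldl (x :: t) ∧ Wdld (a :: x :: t) = Wdld (x :: t) := by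
        match t with
        | [] => exact ⟨by simp [Wldl, ldTrip], by simp [Wdld, ldTrip]⟩
        | y :: t' => exact ⟨by rw [Wldl_cons, hkill.1 y]; simp, by rw [Wdld_cons, hkill.2 y]; simp⟩
      exact ⟨by rw [hfail.1, lcontribN_le1 _ _ (by omega)]; simp,
             by rw [hfail.2, dcontribN_le1 _ _ (by omega)]; simp⟩
    · -- x continues the run
      push_neg at hbr
      obtain ⟨hxo, hxa⟩ := hbr
      have htr : ldTakeRun (ldCls a) (x :: t) =
          ((ldTakeRun (ldCls x) t).1 + 1, (ldTakeRun (ldCls x) t).2) := by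
        simp [ldTakeRun, hxo, hxa]
      rw [htr]
      have IH := ih x hxo
      match t with
      | [] =>
        refine ⟨?_, ?_⟩ <;>
          simp [ldTakeRun, Wldl, Wdld, ldTrip, lcontribN_le1 _ 1 (by omega), dcontribN_le1 _ 1 (by omega)]
      | y :: t' =>
        rw [Wldl_cons, Wdld_cons, IH.1, IH.2]
        by_cases hy : ldCls y = LdCls.o ∨ ldCls y = ldCls x
        · -- the run stops at y: the first window does not match either pattern
          have hk : ldTakeRun (ldCls x) (y :: t') = (0, y :: t') := by
            simp [ldTakeRun, hy]
          rw [hk]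
          have hya : ldCls y ≠ ldCls a := by
            rcases hy with h | h
            · rw [h]; exact fun hc => ha hc.symm
            · rw [h]; exact hxa
          have hw1 : (ld_is_l a && ld_is_d x && ld_is_l y) = false := by
            rcases ldcls_dl (ldCls a) ha with hda | hla
            · simp [ld_is_l_false a (by simp [hda])]
            · simp [ld_is_l_false y (fun hc => hya (hc.trans hla.symm))]
          have hw2 : (ld_is_d a && ld_is_l x && ld_is_d y) = false := by
            rcases ldcls_dl (ldCls a) ha with hda | hla
            · simp [ld_is_d_false y (fun hc => hya (hc.trans hda.symm))]
            · simp [ld_is_d_false a (by simp [hla])]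
          rw [hw1, hw2]
          constructor
          · rw [lcontribN_le1 _ _ (by omega), lcontribN_le1 _ _ (by omega)]; simp
          · rw [dcontribN_le1 _ _ (by omega), dcontribN_le1 _ _ (by omega)]; simp
        · -- the run continues through y, which has a's class
          push_neg at hy
          obtain ⟨hyo, hyx⟩ := hy
          have hya : ldCls y = ldCls a := ldcls_third (ldCls a) (ldCls x) (ldCls y) ha hxo hyo hxa hyx
          have hk : ldTakeRun (ldCls x) (y :: t') =
              ((ldTakeRun (ldCls y) t').1 + 1, (ldTakeRun (ldCls y) t').2) := by
            simp [ldTakeRun, hyo, hyx]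
          rw [hk]
          rcases ldcls_dl (ldCls a) ha with hcl | hcl
          · -- a is a digit, x a letter, y a digit: the first window is d-l-d
            have hxl : ldCls x = LdCls.l := by
              rcases ldcls_dl (ldCls x) hxo with h | h
              · exact absurd (h.trans hcl.symm) hxa
              · exact h
            have h1 : (ld_is_l a && ld_is_d x && ld_is_l y) = false := by
              simp [ld_is_l_false a (fun hc => LdCls.noConfusion (hc.symm.trans hcl))]
            have h2 : (ld_is_d a && ld_is_l x && ld_is_d y) = true := by
              simp [(ld_is_d_iff a).2 hcl, (ld_is_l_iff x).2 hxl, (ld_is_d_iff y).2 (hya.trans hcl)]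
            rw [h1, h2, hcl, hxl]
            constructor
            · simp only [lcontribN]; simp <;> omega
            · simp only [dcontribN]; simp <;> omega
          · -- a is a letter, x a digit, y a letter: the first window is l-d-l
            have hxl : ldCls x = LdCls.d := by
              rcases ldcls_dl (ldCls x) hxo with h | h
              · exact h
              · exact absurd (h.trans hcl.symm) hxa
            have h1 : (ld_is_l a && ld_is_d x && ld_is_l y) = true := by
              simp [(ld_is_l_iff a).2 hcl, (ld_is_d_iff x).2 hxl, (ld_is_l_iff y).2 (hya.trans hcl)]
            have h2 : (ld_is_d a && ld_is_l x && ld_is_d y) = false := by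
              simp [ld_is_d_false a (fun hc => LdCls.noConfusion (hc.symm.trans hcl))]
            rw [h1, h2, hcl, hxl]
            constructor
            · simp only [lcontribN]; simp <;> omega
            · simp only [dcontribN]; simp <;> omega

-- the run-contribution step written with the Nat window counts
lemma ldAdd_eq (acc : Int × Int) (c : LdCls) (k : Nat) :
    ldAdd acc c k = (acc.1 + (lcontribN c k : Int), acc.2 + (dcontribN c k : Int)) := by
  unfold ldAdd
  by_cases hm : (0 : Int) < ((k : Int) + 1) - 2
  · have hk2 : 2 ≤ k := by omega
    have hmval : ((k : Int) + 1) - 2 = ((k - 1 : Nat) : Int) := by push_cast; omega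
    have hmval1 : ((k : Int) + 1) - 2 + 1 = ((k - 1 + 1 : Nat) : Int) := by push_cast; omega
    rw [if_pos hm]
    have hf1 : PySem.Int.floordiv (((k : Int) + 1) - 2) 2 = (((k - 1) / 2 : Nat) : Int) := by
      rw [hmval]; exact_mod_cast PySem.Int.floordiv_natCast (k - 1) 2
    have hf2 : PySem.Int.floordiv ((((k : Int) + 1) - 2) + 1) 2 = (((k - 1 + 1) / 2 : Nat) : Int) := by
      rw [hmval1]; exact_mod_cast PySem.Int.floordiv_natCast (k - 1 + 1) 2
    by_cases hd : c = LdCls.d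
    · rw [if_pos hd]
      simp only [lcontribN, dcontribN, if_pos hd, hf1, hf2]
    · rw [if_neg hd]
      simp only [lcontribN, dcontribN, if_neg hd, hf1, hf2]
  · rw [if_neg hm]
    rw [lcontribN_le1 _ _ (by omega), dcontribN_le1 _ _ (by omega)]
    simp

-- B's outer loop computes the two window counts
lemma ldGo_eq (acc : Int × Int) (s : List Char) :
    ldGo acc s = (acc.1 + (Wldl s : Int), acc.2 + (Wdld s : Int)) := by
  induction acc, s using ldGo.induct with
  | case1 acc => simp [ldGo, Wldl, Wdld, ldTrip]
  | case2 acc x t hx ih =>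
    rw [ldGo, if_pos hx, ih]
    have h1 := ld_is_d_false x (by simp [hx])
    have h2 := ld_is_l_false x (by simp [hx])
    have hskip : Wldl (x :: t) = Wldl t ∧ Wdld (x :: t) = Wdld t := by
      match t with
      | [] => exact ⟨by simp [Wldl, ldTrip], by simp [Wdld, ldTrip]⟩
      | [y] => exact ⟨by simp [Wldl, ldTrip], by simp [Wdld, ldTrip]⟩
      | y :: z :: t' =>
        exact ⟨by rw [Wldl_cons]; simp [h1, h2], by rw [Wdld_cons]; simp [h1, h2]⟩
    rw [hskip.1, hskip.2]
  | case3 acc x t hx ih =>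
    rw [ldGo, if_neg hx, ih, ldAdd_eq]
    have hrun := ld_run t x hx
    rw [hrun.1, hrun.2]
    simp only [Prod.ext_iff]
    constructor <;> (push_cast; ring)

-- ===== VERDICT (by name: the statement is the Claim_ definition above) =====
theorem letter_digit_spec : Claim_equal_letter_digit := by
  intro u _
  show letter_digit u = letter_digit_alt u
  unfold letter_digit letter_digit_alt
  simp only [PySem.List.pyRange_one]
  have h : ((u.toList.length : Int) - 2 - 0).toNat = u.toList.length - 2 := by omega
  rw [h, List.foldl_map]
  simp only [zero_add]
  rw [ld_key u.toList (0, 0), ldGo_eq (0, 0) u.toList]
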